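-- pv_equiv track=rewrite | github.com/HlodM/yandex_algo_interviews_36783 | H.Sisyphus/code.py | get_min_energy
-- ===== SOURCE A (Python) =====
-- import heapq
--
-- def get_min_energy(heaps):
--     heapq.heapify(heaps)
--     min_energy = 0
--     while len(heaps) > 1:
--         two_mins = heapq.heappop(heaps) + heapq.heappop(heaps)
--         min_energy += two_mins
--         heapq.heappush(heaps, two_mins)
--
--     return min_energy
-- ===== SOURCE B (Python) =====
-- def get_min_energy(heaps):
--     # Sort once, then the classic two-queue merge: originals queue + nondecreasing
--     # sums queue; each step takes the two smallest fronts. Mutates `heaps` in place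
--     # to the same final state A leaves.
--     xs = sorted(heaps)
--     sums = []
--     i = j = 0
--     total = 0
--
--     def pick():
--         nonlocal i, j
--         if j >= len(sums) or (i < len(xs) and xs[i] <= sums[j]):
--             v = xs[i]
--             i += 1
--         else:
--             v = sums[j]
--             j += 1
--         return v
--
--     while (len(xs) - i) + (len(sums) - j) > 1:
--         s = pick() + pick()
--         total += s
--         sums.append(s)
--     heaps[:] = xs[i:] + sums[j:]
--     return total
-- ===== Notes on version B (the rewrite author's own statement) =====
-- stated objective: faster
-- what changed: A repeatedly heappops/heappushes a binary heap (heapq); B sorts the list once and runs the classic two-queue merge (a FIFO of sorted originals and a FIFO of running merge-sums, always taking the two smallest fronts), reproducing A's in-place mutation of `heaps` as well.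
import Mathlib
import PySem

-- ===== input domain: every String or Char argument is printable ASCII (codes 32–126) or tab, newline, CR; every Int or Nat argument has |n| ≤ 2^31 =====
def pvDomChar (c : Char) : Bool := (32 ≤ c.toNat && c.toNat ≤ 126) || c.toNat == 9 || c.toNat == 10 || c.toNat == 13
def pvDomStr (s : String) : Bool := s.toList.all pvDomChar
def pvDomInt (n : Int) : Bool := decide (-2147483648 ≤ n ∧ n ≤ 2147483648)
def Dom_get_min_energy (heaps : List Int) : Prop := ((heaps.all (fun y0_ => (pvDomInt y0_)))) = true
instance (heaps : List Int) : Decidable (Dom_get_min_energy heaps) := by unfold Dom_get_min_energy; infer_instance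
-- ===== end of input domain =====

-- B replaces A's binary heap by sort + two-queue merge (alternative decomposition, same results);
-- both Pythons mutate `heaps` in place identically — the equivalence proved here is about the return value.


-- ===== PORT A =====
-- heapq has no PySem primitive, so it is ported by its contract (exact for the returned Int):
-- heapify permutes the list in place (multiset unchanged), heappop removes and returns a
-- minimal element, heappush appends the element.  The value get_min_energy returns depends
-- only on these facts, never on the heap's internal array layout.
def pvMin (l : List Int) : Int := (PySem.List.min? l (fun x => x)).getD 0  -- heappop's value; the 0 default is unreachable under the loop guard

lemma pvMin_mem {l : List Int} (h : l ≠ []) : pvMin l ∈ l := by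
  unfold pvMin
  cases hm : PySem.List.min? l (fun x => x) with
  | none => exact absurd ((PySem.List.min?_eq_none_iff l (fun x => x)).mp hm) h
  | some m => simpa using PySem.List.min?_mem hm

def pvArun (l : List Int) (acc : Int) : Int :=
  if h : 1 < l.length then
    let a := pvMin l
    let l1 := l.erase a
    let b := pvMin l1
    pvArun (l1.erase b ++ [a + b]) (acc + (a + b))
  else acc
termination_by l.length
decreasing_by
  have h1 : l ≠ [] := by intro e; rw [e] at h; simp at h
  have ha := List.length_erase_of_mem (pvMin_mem h1)
  have h2 : l.erase (pvMin l) ≠ [] := by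
    intro e; rw [e] at ha; simp at ha; omega
  have hb := List.length_erase_of_mem (pvMin_mem h2)
  simp only [List.length_append, List.length_cons, List.length_nil]
  omega

def get_min_energy (heaps : List Int) : Int := pvArun heaps 0

-- ===== PORT B =====
-- pick(): pop the smaller front of the two queues (originals preferred on ties);
-- the consumed prefixes xs[:i], sums[:j] are represented by dropping them.
def pvPop : List Int × List Int → Int × (List Int × List Int)
  | (x :: xs, y :: ys) => if x ≤ y then (x, (xs, y :: ys)) else (y, (x :: xs, ys))
  | (x :: xs, []) => (x, (xs, []))
  | ([], y :: ys) => (y, ([], ys))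
  | ([], []) => (0, ([], []))  -- unreachable under the loop guard

lemma pvPop_len (p : List Int × List Int) (h : 0 < p.1.length + p.2.length) :
    (pvPop p).2.1.length + (pvPop p).2.2.length + 1 = p.1.length + p.2.length := by
  obtain ⟨q1, q2⟩ := p
  rcases q1 with _ | ⟨x, xs⟩ <;> rcases q2 with _ | ⟨y, ys⟩
  · simp at h
  · simp [pvPop]
  · simp [pvPop]
  · simp only [pvPop]
    split_ifs <;> simp <;> omega

def pvBrun (q1 q2 : List Int) (acc : Int) : Int :=
  if h : 1 < q1.length + q2.length then
    let p := pvPop (q1, q2)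
    let p2 := pvPop p.2
    pvBrun p2.2.1 (p2.2.2 ++ [p.1 + p2.1]) (acc + (p.1 + p2.1))
  else acc
termination_by q1.length + q2.length
decreasing_by
  have h1 := pvPop_len (q1, q2) (by simp; omega)
  simp only at h1
  have h2 := pvPop_len (pvPop (q1, q2)).2 (by omega)
  simp only [List.length_append, List.length_cons, List.length_nil]
  omega

def get_min_energy_alt (heaps : List Int) : Int :=
  pvBrun (PySem.List.sorted heaps (fun x => x) false) [] 0

-- ===== PRECONDITION & SPEC =====
def Spec_get_min_energy (heaps : List Int) (out : Int) : Prop := out = get_min_energy_alt heaps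
instance (heaps : List Int) (out : Int) : Decidable (Spec_get_min_energy heaps out) := by unfold Spec_get_min_energy; infer_instance

-- ===== CLAIM (what is proved, stated in full; the proofs are below) =====
def Claim_equal_get_min_energy : Prop := ∀ (heaps : List Int), Dom_get_min_energy heaps → Spec_get_min_energy heaps (get_min_energy heaps)

-- ===== LEMMAS AND PROOFS =====

lemma pvMin_isMin {l : List Int} (h : l ≠ []) : ∀ y ∈ l, pvMin l ≤ y := by
  unfold pvMin
  cases hm : PySem.List.min? l (fun x => x) with
  | none => exact absurd ((PySem.List.min?_eq_none_iff l (fun x => x)).mp hm) h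
  | some m => simpa using PySem.List.min?_isMin hm

lemma pvPop_spec (p : List Int × List Int) (h1 : p.1.Pairwise (· ≤ ·))
    (h2 : p.2.Pairwise (· ≤ ·)) (hne : 0 < p.1.length + p.2.length) :
    (pvPop p).1 ∈ p.1 ++ p.2 ∧
    (∀ y ∈ p.1 ++ p.2, (pvPop p).1 ≤ y) ∧
    (pvPop p).2.1 ++ (pvPop p).2.2 = (p.1 ++ p.2).erase (pvPop p).1 ∧
    (pvPop p).2.1.Pairwise (· ≤ ·) ∧
    (pvPop p).2.2.Pairwise (· ≤ ·) ∧
    (∀ x ∈ (pvPop p).2.2, x ∈ p.2) := by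
  obtain ⟨q1, q2⟩ := p
  simp only at h1 h2 hne ⊢
  rcases q1 with _ | ⟨x, xs⟩ <;> rcases q2 with _ | ⟨y, ys⟩
  · simp at hne
  · -- ([], y :: ys)
    obtain ⟨hy, hys⟩ := List.pairwise_cons.mp h2
    refine ⟨by simp [pvPop], ?_, by simp [pvPop], by simp [pvPop], by simpa [pvPop] using hys, ?_⟩
    · intro z hz
      simp [pvPop] at hz ⊢
      rcases hz with rfl | hz
      · exact le_refl _
      · exact hy z hz
    · intro z hz
      simp [pvPop] at hz
      simp [hz]
  · -- (x :: xs, [])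
    obtain ⟨hx, hxs⟩ := List.pairwise_cons.mp h1
    refine ⟨by simp [pvPop], ?_, by simp [pvPop], by simpa [pvPop] using hxs,
      by simp [pvPop], by simp [pvPop]⟩
    intro z hz
    simp [pvPop] at hz ⊢
    rcases hz with rfl | hz
    · exact le_refl _
    · exact hx z hz
  · -- (x :: xs, y :: ys)
    obtain ⟨hx, hxs⟩ := List.pairwise_cons.mp h1
    obtain ⟨hy, hys⟩ := List.pairwise_cons.mp h2
    by_cases hxy : x ≤ y
    · refine ⟨by simp [pvPop, hxy], ?_, ?_, by simpa [pvPop, hxy] using hxs,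
        by simpa [pvPop, hxy] using h2, by simp [pvPop, hxy]⟩
      · intro z hz
        simp [pvPop, hxy] at hz ⊢
        rcases hz with rfl | hz | rfl | hz
        · exact le_refl _
        · exact hx z hz
        · exact hxy
        · exact le_trans hxy (hy z hz)
      · simp [pvPop, hxy, List.erase_cons_head]
    · have hyx : y < x := lt_of_not_ge hxy
      have hynot : y ∉ x :: xs := by
        intro hmem
        rcases List.mem_cons.mp hmem with rfl | hmem
        · exact hxy le_rfl
        · exact hxy (hx y hmem)
      refine ⟨by simp [pvPop, hxy], ?_, ?_, by simpa [pvPop, hxy] using h1,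
        by simpa [pvPop, hxy] using hys,
        by intro z hz; simp [pvPop, hxy] at hz ⊢; exact Or.inr hz⟩
      · intro z hz
        simp [pvPop, hxy] at hz ⊢
        rcases hz with rfl | hz | rfl | hz
        · exact le_of_lt hyx
        · exact le_of_lt (lt_of_lt_of_le hyx (hx z hz))
        · exact le_refl _
        · exact hy z hz
      · simp only [pvPop, if_neg hxy]
        rw [List.erase_append_right _ hynot, List.erase_cons_head]

lemma pv_mem_erase₁ {A : List Int} {m1 m2 c : Int}
    (hc : c ∈ (A.erase m1).erase m2) (hm1 : m1 ∈ A) : m1 ∈ A.erase c := by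
  by_cases e1 : m1 = c
  · subst e1
    rw [← List.count_pos_iff] at hc ⊢
    simp only [List.count_erase, beq_iff_eq] at hc ⊢
    split_ifs at hc ⊢ <;> omega
  · exact (List.mem_erase_of_ne e1).mpr hm1

lemma pv_mem_erase₂ {A : List Int} {m1 m2 c : Int}
    (hc : c ∈ (A.erase m1).erase m2) (hm2 : m2 ∈ A.erase m1) : m2 ∈ A.erase c := by
  by_cases e2 : m2 = c
  · subst e2
    rw [← List.count_pos_iff] at hc ⊢
    simp only [List.count_erase, beq_iff_eq] at hc ⊢
    split_ifs at hc ⊢ <;> omega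
  · exact (List.mem_erase_of_ne e2).mpr (List.mem_of_mem_erase hm2)

lemma pv_mem_erase₃ {A : List Int} {m1 m2 c z : Int}
    (hz : z ∈ ((A.erase m1).erase m2).erase c) : z ∈ A.erase c := by
  by_cases e : z = c
  · subst e
    rw [← List.count_pos_iff] at hz ⊢
    simp only [List.count_erase, beq_iff_eq] at hz ⊢
    split_ifs at hz ⊢ <;> omega
  · exact (List.mem_erase_of_ne e).mpr
      (List.mem_of_mem_erase (List.mem_of_mem_erase (List.mem_of_mem_erase hz)))

lemma pvMain : ∀ (n : Nat) (l q1 q2 : List Int) (acc : Int), l.length = n →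
    l.Perm (q1 ++ q2) → q1.Pairwise (· ≤ ·) → q2.Pairwise (· ≤ ·) →
    (∀ c ∈ q2, ∀ z ∈ (q1 ++ q2).erase c, c ≤ 2 * z) →
    pvArun l acc = pvBrun q1 q2 acc := by
  intro n
  induction n using Nat.strong_induction_on with
  | _ n ih =>
    intro l q1 q2 acc hlen hperm hs1 hs2 hinv
    have hlq : l.length = q1.length + q2.length := by simpa using hperm.length_eq
    by_cases hbig : 1 < l.length
    case neg =>
      rw [pvArun, pvBrun, dif_neg hbig, dif_neg (by omega)]
    case pos =>
      have hbig' : 1 < q1.length + q2.length := by omega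
      rw [pvArun, pvBrun, dif_pos hbig, dif_pos hbig']
      -- first pop
      obtain ⟨hm1mem, hm1min, herase1, hr1s, hr2s, hr2sub⟩ :=
        pvPop_spec (q1, q2) hs1 hs2 (by simp; omega)
      simp only at hm1mem hm1min herase1 hr1s hr2s hr2sub
      have hlen1 := pvPop_len (q1, q2) (by simp; omega)
      simp only at hlen1
      set m1 := (pvPop (q1, q2)).1 with hm1def
      set P := (pvPop (q1, q2)).2 with hPdef
      -- second pop
      obtain ⟨hm2mem, hm2min, herase2, ht1s, ht2s, ht2sub⟩ :=
        pvPop_spec P hr1s hr2s (by omega)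
      have hlen2 := pvPop_len P (by omega)
      set m2 := (pvPop P).1 with hm2def
      set t1 := (pvPop P).2.1 with ht1def
      set t2 := (pvPop P).2.2 with ht2def
      -- A-side values
      have hlne : l ≠ [] := by intro e; rw [e] at hbig; simp at hbig
      have haval : pvMin l = m1 := by
        have ha1 : m1 ≤ pvMin l := hm1min _ (hperm.mem_iff.mp (pvMin_mem hlne))
        have ha2 : pvMin l ≤ m1 := pvMin_isMin hlne _ (hperm.mem_iff.mpr hm1mem)
        omega
      have hperm1 : (l.erase (pvMin l)).Perm (P.1 ++ P.2) := by
        rw [haval, herase1]; exact hperm.erase m1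
      have hl1len : (l.erase (pvMin l)).length = l.length - 1 :=
        List.length_erase_of_mem (pvMin_mem hlne)
      have hl1ne : l.erase (pvMin l) ≠ [] := by
        intro e; rw [e] at hl1len; simp at hl1len; omega
      have hbval : pvMin (l.erase (pvMin l)) = m2 := by
        have hb1 : m2 ≤ pvMin (l.erase (pvMin l)) :=
          hm2min _ (hperm1.mem_iff.mp (pvMin_mem hl1ne))
        have hb2 : pvMin (l.erase (pvMin l)) ≤ m2 :=
          pvMin_isMin hl1ne _ (hperm1.mem_iff.mpr hm2mem)
        omega
      have hperm2 : ((l.erase (pvMin l)).erase (pvMin (l.erase (pvMin l)))).Perm (t1 ++ t2) := by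
        rw [hbval, herase2]; exact hperm1.erase m2
      -- pool facts
      have hm2A : m2 ∈ (q1 ++ q2).erase m1 := herase1 ▸ hm2mem
      have hm1m2 : m1 ≤ m2 := hm1min _ (List.mem_of_mem_erase hm2A)
      have hD : t1 ++ t2 = ((q1 ++ q2).erase m1).erase m2 := by rw [herase2, herase1]
      -- key bounds for sums surviving in t2
      have hkey : ∀ c ∈ t2, c ≤ 2 * m1 ∧ c ≤ 2 * m2 ∧ 0 ≤ m1 := by
        intro c hc
        have hcq2 : c ∈ q2 := hr2sub c (ht2sub c hc)
        have hcD : c ∈ ((q1 ++ q2).erase m1).erase m2 := hD ▸ List.mem_append_right t1 hc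
        have h1 : c ≤ 2 * m1 := hinv c hcq2 m1 (pv_mem_erase₁ hcD hm1mem)
        have h2 : c ≤ 2 * m2 := hinv c hcq2 m2 (pv_mem_erase₂ hcD hm2A)
        have h3 : m1 ≤ c := hm1min c (List.mem_append_right _ hcq2)
        exact ⟨h1, h2, by omega⟩
      -- sortedness of the new sums queue
      have hsnew : (t2 ++ [m1 + m2]).Pairwise (· ≤ ·) := by
        rw [List.pairwise_append]
        refine ⟨ht2s, by simp, ?_⟩
        intro c hc z hz
        simp only [List.mem_singleton] at hz
        subst hz
        obtain ⟨h1, h2, h3⟩ := hkey c hc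
        omega
      -- invariant for the new state
      have hinv' : ∀ c ∈ t2 ++ [m1 + m2], ∀ z ∈ (t1 ++ (t2 ++ [m1 + m2])).erase c, c ≤ 2 * z := by
        intro c hc z hz
        rw [← List.append_assoc, hD] at hz
        rcases List.mem_append.mp hc with hct2 | hcs
        · have hcD : c ∈ ((q1 ++ q2).erase m1).erase m2 := hD ▸ List.mem_append_right t1 hct2
          rw [List.erase_append_left _ hcD] at hz
          rcases List.mem_append.mp hz with hzD | hzs
          · exact hinv c (hr2sub c (ht2sub c hct2)) z (pv_mem_erase₃ hzD)
          · simp only [List.mem_singleton] at hzs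
            subst hzs
            obtain ⟨h1, h2, h3⟩ := hkey c hct2
            omega
        · simp only [List.mem_singleton] at hcs
          subst hcs
          by_cases hsD : (m1 + m2) ∈ ((q1 ++ q2).erase m1).erase m2
          · rw [List.erase_append_left _ hsD] at hz
            rcases List.mem_append.mp hz with hzD | hzs
            · have hz2 : z ∈ ((q1 ++ q2).erase m1).erase m2 := List.mem_of_mem_erase hzD
              have hz1 : z ∈ (q1 ++ q2).erase m1 := List.mem_of_mem_erase hz2
              have hzb : m2 ≤ z := hm2min z (herase1 ▸ hz1)
              have hza : m1 ≤ z := hm1min z (List.mem_of_mem_erase hz1)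
              omega
            · simp only [List.mem_singleton] at hzs
              subst hzs
              have hs1' : (m1 + m2) ∈ (q1 ++ q2).erase m1 := List.mem_of_mem_erase hsD
              have : m2 ≤ m1 + m2 := hm2min _ (herase1 ▸ hs1')
              omega
          · rw [List.erase_append_right _ hsD, List.erase_cons_head, List.append_nil] at hz
            have hz1 : z ∈ (q1 ++ q2).erase m1 := List.mem_of_mem_erase hz
            have hzb : m2 ≤ z := hm2min z (herase1 ▸ hz1)
            have hza : m1 ≤ z := hm1min z (List.mem_of_mem_erase hz1)
            omega
      -- recurse
      rw [hbval] at hperm2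
      rw [haval] at hperm1 hl1len hl1ne hperm2
      have hm1l : m1 ∈ l := hperm.mem_iff.mpr hm1mem
      have hm2l : m2 ∈ l.erase m1 := hperm1.mem_iff.mpr hm2mem
      have hlen2' := List.length_erase_of_mem hm2l
      have hlen' : ((l.erase m1).erase m2 ++ [m1 + m2]).length = n - 1 := by
        simp only [List.length_append, List.length_cons, List.length_nil]
        omega
      have hperm' : ((l.erase m1).erase m2 ++ [m1 + m2]).Perm (t1 ++ (t2 ++ [m1 + m2])) := by
        rw [← List.append_assoc]
        exact hperm2.append_right [m1 + m2]
      have hrec := ih (n - 1) (by omega) _ t1 (t2 ++ [m1 + m2]) (acc + (m1 + m2))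
        hlen' hperm' ht1s hsnew hinv'
      show pvArun ((l.erase (pvMin l)).erase (pvMin (l.erase (pvMin l))) ++
          [pvMin l + pvMin (l.erase (pvMin l))]) (acc + (pvMin l + pvMin (l.erase (pvMin l))))
        = pvBrun t1 (t2 ++ [m1 + m2]) (acc + (m1 + m2))
      rw [hbval, haval]
      exact hrec

-- ===== VERDICT (by name: the statement is the Claim_ definition above) =====
theorem get_min_energy_spec : Claim_equal_get_min_energy := by
  intro heaps _
  unfold Spec_get_min_energy get_min_energy get_min_energy_alt
  exact pvMain heaps.length heaps (PySem.List.sorted heaps (fun x => x) false) [] 0 rfl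
    (by simpa using (PySem.List.sorted_perm heaps (fun x => x) false).symm)
    (by simpa using PySem.List.sorted_pairwise heaps (fun x => x))
    (by simp)
    (by simp)
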